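-- pv_equiv track=rewrite | github.com/gems-uff/mestre | scripts/collect_chunk_size.py | getLeftChunkCode
-- ===== SOURCE A (Python) =====
-- def getLeftChunkCode(chunkCode):
--     lines = chunkCode.split("\n")
--     leftChunk = ""
--     start = False
--     for line in lines:
--         if("<<<<<<<" in line):
--             start = True
--             continue
--         if("=======" in line):
--             break
--         if(start == True):
--             leftChunk+=line+"\n"
--     return leftChunk
-- ===== SOURCE B (Python) =====
-- def getLeftChunkCode(chunkCode):
--     lines = chunkCode.split("\n")
--     s = next((i for i, l in enumerate(lines) if "<<<<<<<" in l), None)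
--     if s is None:
--         return ""
--     e = next((j for j in range(s + 1, len(lines)) if "=======" in lines[j]), len(lines))
--     return "".join(l + "\n" for l in lines[s + 1:e])
-- ===== Notes on version B (the rewrite author's own statement) =====
-- stated objective: alternative
-- what changed: Replaces A's flag-driven accumulator loop with a locate-then-slice decomposition (find the first '<<<<<<<' line, find the next '=======' line, join the slice between them); Pre_ excludes chunks whose conflict markers are not well-nested (a '=======' line before the first '<<<<<<<' line, or another '<<<<<<<' appearing between the opening marker and the closing '======='), where no extraction is specified and A's flag/continue behaviour is as arbitrary as B's.
-- outside the precondition, e.g. on getLeftChunkCode('=======\n<<<<<<<\nx\n======='): A returns '', B returns 'x\n'; on getLeftChunkCode('<<<<<<<\na\n<<<<<<<\nb\n======='): A returns 'a\nb\n', B returns 'a\n<<<<<<<\nb\n'; on getLeftChunkCode('<<<<<<<\na\n<<<<<<<=======\nb'): A returns 'a\nb\n', B returns 'a\n'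
import Mathlib
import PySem

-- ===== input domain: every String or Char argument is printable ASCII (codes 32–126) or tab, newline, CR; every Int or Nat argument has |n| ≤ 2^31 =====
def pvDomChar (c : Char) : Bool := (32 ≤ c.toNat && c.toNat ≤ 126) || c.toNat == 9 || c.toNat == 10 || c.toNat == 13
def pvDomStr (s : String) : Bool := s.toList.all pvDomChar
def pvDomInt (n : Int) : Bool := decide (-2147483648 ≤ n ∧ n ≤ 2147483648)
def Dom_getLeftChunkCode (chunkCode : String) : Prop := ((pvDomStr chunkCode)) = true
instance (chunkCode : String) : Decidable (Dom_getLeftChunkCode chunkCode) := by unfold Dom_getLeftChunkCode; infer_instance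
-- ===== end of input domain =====

-- B replaces A's flag-driven accumulator loop by a locate-then-slice decomposition (find the first
-- '<<<<<<<' line, find the next '=======' line, join the slice between them); objective: alternative,
-- same cost. Pre_ restricts the claim to well-nested conflict markers (see its comment).

-- the two conflict-marker literals, shared by both ports
def mrk : List Char := "<<<<<<<".toList
def sep7 : List Char := "=======".toList

-- ===== PORT A =====
-- A's loop: state = (accumulated leftChunk, start flag); a '<<<<<<<' line sets start and continues,
-- a '=======' line breaks (returns the accumulator), otherwise append line+'\n' when started.
-- Strings are handled on the List Char side (PySem.Chars), wrapped back with String.mk.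
def goA : List (List Char) → List Char → Bool → List Char
  | [], acc, _ => acc
  | l :: rest, acc, start =>
    if PySem.Chars.isIn mrk l then goA rest acc true
    else if PySem.Chars.isIn sep7 l then acc
    else if start then goA rest (acc ++ (l ++ ['\n'])) start
    else goA rest acc start

def getLeftChunkCode (chunkCode : String) : String :=
  String.mk (goA (PySem.Chars.splitOn chunkCode.toList "\n".toList) [] false)

-- ===== PORT B =====
-- s = first line containing '<<<<<<<' (none → ""); e = first j in range(s+1, len(lines)) with
-- '=======' in lines[j], default len(lines); result = join of lines[s+1:e] each + '\n'.
-- lines[s+1:e] is ported as (lines.drop (s+1)).take t with e = s+1+t, exact for these bounds.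
def altCore (lines : List (List Char)) : List Char :=
  match lines.findIdx? (fun l => PySem.Chars.isIn mrk l) with
  | none => []
  | some s =>
    let tail := lines.drop (s + 1)
    let t := (tail.findIdx? (fun l => PySem.Chars.isIn sep7 l)).getD tail.length
    PySem.Chars.join [] ((tail.take t).map (fun l => l ++ ['\n']))

def getLeftChunkCode_alt (chunkCode : String) : String :=
  String.mk (altCore (PySem.Chars.splitOn chunkCode.toList "\n".toList))

-- ===== PRECONDITION & SPEC =====
-- Pre_ excludes chunks whose conflict markers are not well-nested — a '=======' line before the
-- first '<<<<<<<' line, or another '<<<<<<<' line between the opening marker and the closing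
-- '=======' (or end) — malformed conflicts on which no extraction is specified and A's
-- flag/continue behaviour is as arbitrary as B's.
def preCore (lines : List (List Char)) : Bool :=
  match lines.findIdx? (fun l => PySem.Chars.isIn mrk l) with
  | none => true
  | some s =>
    (lines.take s).all (fun l => !PySem.Chars.isIn sep7 l) &&
    (let tail := lines.drop (s + 1)
     let b := match tail.findIdx? (fun l => PySem.Chars.isIn sep7 l) with
              | none => tail.length
              | some t => t + 1
     (tail.take b).all (fun l => !PySem.Chars.isIn mrk l))

def Pre_getLeftChunkCode (chunkCode : String) : Prop :=
  preCore (PySem.Chars.splitOn chunkCode.toList "\n".toList) = true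
instance (chunkCode : String) : Decidable (Pre_getLeftChunkCode chunkCode) := by
  unfold Pre_getLeftChunkCode; infer_instance

def pvWitness_getLeftChunkCode : String := "<<<<<<<\na\n======="

def Spec_getLeftChunkCode (chunkCode : String) (out : String) : Prop := out = getLeftChunkCode_alt chunkCode
instance (chunkCode : String) (out : String) : Decidable (Spec_getLeftChunkCode chunkCode out) := by unfold Spec_getLeftChunkCode; infer_instance

-- ===== CLAIM (what is proved, stated in full; the proofs are below) =====
def Claim_equal_getLeftChunkCode : Prop := ∀ (chunkCode : String), Dom_getLeftChunkCode chunkCode → Pre_getLeftChunkCode chunkCode → Spec_getLeftChunkCode chunkCode (getLeftChunkCode chunkCode)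

-- ===== LEMMAS AND PROOFS =====

theorem join_flat (xs : List (List Char)) : PySem.Chars.join [] xs = xs.flatten := by
  induction xs with
  | nil => simp [PySem.Chars.join, List.intercalate]
  | cons x xs ih =>
    have h : PySem.Chars.join [] (x :: xs) = x ++ PySem.Chars.join [] xs := by
      cases xs <;> simp [PySem.Chars.join, List.intercalate, List.intersperse]
    simp [h, ih]

-- reference recursions: fmid = A's loop with start = false, gmid = with start = true
def gmid : List (List Char) → List Char
  | [] => []
  | l :: ls =>
    if PySem.Chars.isIn mrk l then gmid ls
    else if PySem.Chars.isIn sep7 l then []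
    else l ++ '\n' :: gmid ls

def fmid : List (List Char) → List Char
  | [] => []
  | l :: ls =>
    if PySem.Chars.isIn mrk l then gmid ls
    else if PySem.Chars.isIn sep7 l then []
    else fmid ls

theorem goA_eq (ls : List (List Char)) : ∀ (acc : List Char) (start : Bool),
    goA ls acc start = acc ++ (if start then gmid ls else fmid ls) := by
  induction ls with
  | nil => intro acc start; cases start <;> simp [goA, gmid, fmid]
  | cons l ls ih =>
    intro acc start
    by_cases h1 : PySem.Chars.isIn mrk l = true
    · cases start <;> simp [goA, gmid, fmid, h1, ih]
    · by_cases h2 : PySem.Chars.isIn sep7 l = true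
      · cases start <;> simp [goA, gmid, fmid, h1, h2]
      · cases start <;> simp [goA, gmid, fmid, h1, h2, ih]

-- if no line contains '<<<<<<<', the not-yet-started loop emits nothing
theorem fmid_no_mrk (ls : List (List Char))
    (h : ∀ l ∈ ls, PySem.Chars.isIn mrk l = false) : fmid ls = [] := by
  induction ls with
  | nil => simp [fmid]
  | cons l ls ih =>
    have h1 := h l (by simp)
    by_cases h2 : PySem.Chars.isIn sep7 l = true
    · simp [fmid, h1, h2]
    · simp [fmid, h1, h2, ih (fun x hx => h x (by simp [hx]))]

-- b-bound of preCore's second conjunct, as a function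
def bIdx (tail : List (List Char)) : Nat :=
  match tail.findIdx? (fun l => PySem.Chars.isIn sep7 l) with
  | none => tail.length
  | some t => t + 1

-- t-bound of altCore's slice
def tIdx (tail : List (List Char)) : Nat :=
  (tail.findIdx? (fun l => PySem.Chars.isIn sep7 l)).getD tail.length

-- the started loop emits exactly the lines up to the next '=======' line, given that no
-- '<<<<<<<' line occurs up to and including that boundary
theorem gmid_spec (tail : List (List Char))
    (h : ∀ l ∈ tail.take (bIdx tail), PySem.Chars.isIn mrk l = false) :
    gmid tail = ((tail.take (tIdx tail)).map (fun l => l ++ ['\n'])).flatten := by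
  induction tail with
  | nil => simp [gmid, tIdx]
  | cons l ls ih =>
    by_cases h2 : PySem.Chars.isIn sep7 l = true
    · have hb : bIdx (l :: ls) = 1 := by
        unfold bIdx; rw [List.findIdx?_cons, h2]; rfl
      have h1 : PySem.Chars.isIn mrk l = false := h l (by rw [hb]; simp)
      have ht : tIdx (l :: ls) = 0 := by
        unfold tIdx; rw [List.findIdx?_cons, h2]; rfl
      simp [gmid, h1, h2, ht]
    · have h2' : PySem.Chars.isIn sep7 l = false := by simp at h2; exact h2
      have hb : bIdx (l :: ls) = bIdx ls + 1 := by
        unfold bIdx; rw [List.findIdx?_cons, h2']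
        cases ls.findIdx? (fun l => PySem.Chars.isIn sep7 l) <;> simp
      have ht : tIdx (l :: ls) = tIdx ls + 1 := by
        unfold tIdx; rw [List.findIdx?_cons, h2']
        cases ls.findIdx? (fun l => PySem.Chars.isIn sep7 l) <;> simp
      rw [hb] at h
      have h1 : PySem.Chars.isIn mrk l = false := h l (by simp)
      have hrest : ∀ x ∈ ls.take (bIdx ls), PySem.Chars.isIn mrk x = false := by
        intro x hx; exact h x (by simp [hx])
      rw [ht]
      simp [gmid, h1, h2', ih hrest]

-- main bridge: on well-nested inputs the not-yet-started loop equals B's locate-then-slice value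
theorem fmid_eq_altCore (ls : List (List Char)) (h : preCore ls = true) :
    fmid ls = altCore ls := by
  induction ls with
  | nil => simp [fmid, altCore]
  | cons l ls ih =>
    by_cases h1 : PySem.Chars.isIn mrk l = true
    · -- opening marker is the head line: s = 0
      have hf : (l :: ls).findIdx? (fun l => PySem.Chars.isIn mrk l) = some 0 := by
        rw [List.findIdx?_cons, h1]; rfl
      unfold preCore at h; rw [hf] at h
      simp only [List.drop_succ_cons, List.drop_zero, Bool.and_eq_true, List.all_eq_true] at h
      have hg := gmid_spec ls (by
        intro x hx
        have := h.2 x (by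
          revert hx
          unfold bIdx
          cases hf2 : ls.findIdx? (fun l => PySem.Chars.isIn sep7 l) <;> simp [hf2])
        simpa using this)
      unfold altCore; rw [hf]
      simp only [fmid, h1, if_true, List.drop_succ_cons, List.drop_zero]
      rw [join_flat, hg]; rfl
    · have h1' : PySem.Chars.isIn mrk l = false := by simp at h1; exact h1
      cases hf : ls.findIdx? (fun l => PySem.Chars.isIn mrk l) with
      | none =>
        -- no opening marker anywhere: both sides empty
        have hnone : (l :: ls).findIdx? (fun l => PySem.Chars.isIn mrk l) = none := by
          rw [List.findIdx?_cons, h1']; simpa using hf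
        have hall : ∀ x ∈ l :: ls, PySem.Chars.isIn mrk x = false := by
          intro x hx
          have := List.findIdx?_eq_none_iff.mp hnone x hx
          simpa using this
        rw [fmid_no_mrk _ hall]
        unfold altCore; rw [hnone]
      | some s =>
        -- marker later: head is an ordinary line, peel it off both sides
        have hcons : (l :: ls).findIdx? (fun l => PySem.Chars.isIn mrk l) = some (s + 1) := by
          rw [List.findIdx?_cons, h1', hf]; rfl
        unfold preCore at h; rw [hcons] at h
        simp only [List.take_succ_cons, List.drop_succ_cons, Bool.and_eq_true,
          List.all_eq_true, List.mem_cons] at h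
        have h2' : PySem.Chars.isIn sep7 l = false := by
          have := h.1 l (Or.inl rfl); simpa using this
        have hpre : preCore ls = true := by
          unfold preCore; rw [hf]
          simp only [Bool.and_eq_true, List.all_eq_true]
          exact ⟨fun x hx => h.1 x (Or.inr hx), h.2⟩
        have halt : altCore (l :: ls) = altCore ls := by
          unfold altCore; rw [hcons, hf]; rfl
        rw [halt, fmid, if_neg (by simp [h1']), if_neg (by simp [h2']), ih hpre]

-- ===== VERDICT (by name: the statement is the Claim_ definition above) =====
theorem getLeftChunkCode_spec : Claim_equal_getLeftChunkCode := by
  intro chunkCode _ hpre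
  show _ = _
  unfold getLeftChunkCode getLeftChunkCode_alt
  rw [goA_eq, fmid_eq_altCore _ hpre]
  simp
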